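-- pv_equiv track=rewrite | github.com/TitoAgudelo/genlogs-platform | apps/api/services/ai_service.py | _extract_cities
-- ===== SOURCE A (Python) =====
-- KNOWN_CITIES = {
--     "new york", "washington dc", "san francisco", "los angeles",
--     "chicago", "detroit", "dallas", "houston", "miami", "atlanta",
--     "seattle", "portland", "boston", "philadelphia", "denver", "salt lake city",
-- }
--
-- def _normalize(text: str) -> str:
--     return text.strip().lower()
--
-- def _extract_cities(query: str) -> tuple[str | None, str | None]:
--     """Extract origin and destination cities from a natural language query, preserving order of appearance."""
--     query_lower = _normalize(query)
--
--     # Find all cities with their position in the query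
--     found: list[tuple[int, str]] = []
--     for city in sorted(KNOWN_CITIES, key=len, reverse=True):
--         pos = query_lower.find(city)
--         if pos != -1:
--             found.append((pos, city))
--             # Replace to avoid substring re-matching
--             query_lower = query_lower[:pos] + ("_" * len(city)) + query_lower[pos + len(city):]
--
--     # Sort by position to respect query order
--     found.sort(key=lambda x: x[0])
--
--     if len(found) >= 2:
--         return found[0][1], found[1][1]
--     if len(found) == 1:
--         return found[0][1], None
--     return None, None
-- ===== SOURCE B (Python) =====
-- KNOWN_CITIES = {
--     "new york", "washington dc", "san francisco", "los angeles",
--     "chicago", "detroit", "dallas", "houston", "miami", "atlanta",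
--     "seattle", "portland", "boston", "philadelphia", "denver", "salt lake city",
-- }
--
-- def _normalize(text: str) -> str:
--     return text.strip().lower()
--
-- def _first_free(q: str, city: str, claimed: list) -> int | None:
--     """First position where city occurs in q without touching any claimed range."""
--     for pos in range(len(q) - len(city) + 1):
--         if q.startswith(city, pos) and all(pos + len(city) <= s or e <= pos for s, e in claimed):
--             return pos
--     return None
--
-- def _extract_cities(query: str) -> tuple[str | None, str | None]:
--     q = _normalize(query)
--     claimed: list[tuple[int, int]] = []
--     found: list[tuple[int, str]] = []
--     for city in sorted(KNOWN_CITIES, key=len, reverse=True):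
--         pos = _first_free(q, city, claimed)
--         if pos is not None:
--             found.append((pos, city))
--             claimed.append((pos, pos + len(city)))
--     found.sort(key=lambda x: x[0])
--     if len(found) >= 2:
--         return found[0][1], found[1][1]
--     if len(found) == 1:
--         return found[0][1], None
--     return None, None
-- ===== Notes on version B (the rewrite author's own statement) =====
-- stated objective: alternative
-- what changed: B replaces A's repeated rebuilding of the query string with underscore masks by a maintained list of claimed index ranges and a direct scan for each city's first occurrence that overlaps no claimed range.
import Mathlib
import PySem

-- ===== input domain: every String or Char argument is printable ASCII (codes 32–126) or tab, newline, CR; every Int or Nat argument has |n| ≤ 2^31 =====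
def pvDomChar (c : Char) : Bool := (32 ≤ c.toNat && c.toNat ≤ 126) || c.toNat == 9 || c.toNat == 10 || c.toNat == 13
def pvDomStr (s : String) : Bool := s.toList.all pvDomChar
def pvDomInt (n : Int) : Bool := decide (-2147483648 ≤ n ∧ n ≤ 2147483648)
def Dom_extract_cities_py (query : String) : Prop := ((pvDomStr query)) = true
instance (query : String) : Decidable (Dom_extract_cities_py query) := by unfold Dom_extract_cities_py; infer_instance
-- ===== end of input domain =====

-- B replaces A's repeated string masking (rebuilding the query with '_' blocks after each hit)
-- by a list of claimed index ranges and a direct scan for the first non-overlapping occurrence;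
-- objective: alternative (same result, no rebuilt strings).

-- shared literal: KNOWN_CITIES and sorted(KNOWN_CITIES, key=len, reverse=True)
-- (deterministic despite Python's set hash order: no two equal-length cities can overlap)
def pvCities : PySem.Set (List Char) := PySem.Set.ofList
  ["new york".toList, "washington dc".toList, "san francisco".toList, "los angeles".toList,
   "chicago".toList, "detroit".toList, "dallas".toList, "houston".toList, "miami".toList,
   "atlanta".toList, "seattle".toList, "portland".toList, "boston".toList, "philadelphia".toList,
   "denver".toList, "salt lake city".toList]

def pvSortedCities : List (List Char) := PySem.List.sorted pvCities (fun c => c.length) true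

-- ===== PORT A =====
-- one iteration of A's loop: state = (masked query, found); mask the hit with '_' * len(city)
def pvMaskStep (st : List Char × List (Int × List Char)) (city : List Char) :
    List Char × List (Int × List Char) :=
  let pos := PySem.Chars.find st.1 city
  if pos ≠ -1 then
    (PySem.Chars.slice st.1 none (some pos) ++ List.replicate city.length '_' ++
       PySem.Chars.slice st.1 (some (pos + (city.length : Int))) none,
     st.2 ++ [(pos, city)])
  else st

def extract_cities_py (query : String) : Option String × Option String :=
  let ql := PySem.Chars.lower (PySem.Chars.strip query.toList)
  let st := pvSortedCities.foldl pvMaskStep (ql, [])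
  let found := PySem.List.sorted st.2 (fun x => x.1) false
  match found with
  | f0 :: f1 :: _ => (some (String.ofList f0.2), some (String.ofList f1.2))
  | [f0] => (some (String.ofList f0.2), none)
  | [] => (none, none)

-- ===== PORT B =====
-- does [pos, pos+len) avoid every claimed range?
def pvFreeB (pos len : Nat) (claimed : List (Nat × Nat)) : Bool :=
  claimed.all fun r => decide (pos + len ≤ r.1) || decide (r.2 ≤ pos)

-- first position where city occurs in q without touching any claimed range (B's _first_free)
def pvFirstFree (q city : List Char) (claimed : List (Nat × Nat)) : Option Nat :=
  (List.range (q.length - city.length + 1)).find?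
    (fun p => city.isPrefixOf (q.drop p) && pvFreeB p city.length claimed)

-- one iteration of B's loop: state = (claimed ranges, found)
def pvClaimStep (q : List Char) (st : List (Nat × Nat) × List (Int × List Char))
    (city : List Char) : List (Nat × Nat) × List (Int × List Char) :=
  match pvFirstFree q city st.1 with
  | some p => (st.1 ++ [(p, p + city.length)], st.2 ++ [((p : Int), city)])
  | none => st

def extract_cities_py_alt (query : String) : Option String × Option String :=
  let q := PySem.Chars.lower (PySem.Chars.strip query.toList)
  let st := pvSortedCities.foldl (pvClaimStep q) ([], [])
  let found := PySem.List.sorted st.2 (fun x => x.1) false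
  match found with
  | f0 :: f1 :: _ => (some (String.ofList f0.2), some (String.ofList f1.2))
  | [f0] => (some (String.ofList f0.2), none)
  | [] => (none, none)

-- ===== PRECONDITION & SPEC =====
def Spec_extract_cities_py (query : String) (out : Option String × Option String) : Prop := out = extract_cities_py_alt query
instance (query : String) (out : Option String × Option String) : Decidable (Spec_extract_cities_py query out) := by unfold Spec_extract_cities_py; infer_instance

-- ===== CLAIM (what is proved, stated in full; the proofs are below) =====
def Claim_equal_extract_cities_py : Prop := ∀ (query : String), Dom_extract_cities_py query → Spec_extract_cities_py query (extract_cities_py query)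

-- ===== LEMMAS AND PROOFS =====

-- is index i inside one of the claimed ranges?
def pvCovered (claimed : List (Nat × Nat)) (i : Nat) : Bool :=
  claimed.any fun r => decide (r.1 ≤ i) && decide (i < r.2)

-- q with every claimed index replaced by '_': the string A's loop actually holds
def pvMask (q : List Char) (claimed : List (Nat × Nat)) : List Char :=
  q.mapIdx fun i c => if pvCovered claimed i then '_' else c

lemma pvMask_length (q : List Char) (claimed : List (Nat × Nat)) :
    (pvMask q claimed).length = q.length := by
  simp [pvMask]

lemma pvMask_nil (q : List Char) : pvMask q [] = q := by
  unfold pvMask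
  have h : ∀ (f : Nat → Char → Char), (∀ i c, f i c = c) → ∀ (l : List Char), List.mapIdx f l = l := by
    intro f hf l
    induction l generalizing f with
    | nil => rfl
    | cons a t ih => simp [List.mapIdx_cons, hf, ih _ (fun i c => hf (i + 1) c)]
  exact h _ (fun i c => by simp [pvCovered]) q

lemma pvMask_getElem (q : List Char) (claimed : List (Nat × Nat)) (i : Nat)
    (h : i < (pvMask q claimed).length) :
    (pvMask q claimed)[i] = if pvCovered claimed i then '_' else q[i]'(by
      simpa [pvMask_length] using h) := by
  simp [pvMask]

lemma pvMask_getElem? (q : List Char) (claimed : List (Nat × Nat)) (i : Nat)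
    (h : i < q.length) :
    (pvMask q claimed)[i]? = some (if pvCovered claimed i then '_' else q[i]) := by
  rw [List.getElem?_eq_getElem (by simpa [pvMask_length] using h), pvMask_getElem]

-- a prefix of the masked string at p is a prefix of q at p that avoids all claimed ranges
lemma pvPrefix_mask_iff (q city : List Char) (claimed : List (Nat × Nat))
    (hno : '_' ∉ city) (hlen : 0 < city.length)
    (hr : ∀ r ∈ claimed, r.1 < r.2) (p : Nat) :
    city <+: (pvMask q claimed).drop p ↔
      (city <+: q.drop p ∧ pvFreeB p city.length claimed = true) := by
  constructor
  · intro hpre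
    have hle : city.length ≤ q.length - p := by
      have := hpre.length_le
      simpa [pvMask_length] using this
    have hplen : p + city.length ≤ q.length := by omega
    have key : ∀ j (hj : j < city.length),
        pvCovered claimed (p + j) = false ∧ q[p + j]'(by omega) = city[j] := by
      intro j hj
      have h1 := List.prefix_iff_getElem?.mp hpre j hj
      rw [List.getElem?_drop, pvMask_getElem? q claimed (p + j) (by omega)] at h1
      by_cases hc : pvCovered claimed (p + j)
      · exfalso
        rw [if_pos hc] at h1
        have : city[j] = '_' := by simpa using h1.symm
        exact hno (this ▸ List.getElem_mem hj)
      · rw [if_neg hc] at h1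
        exact ⟨by simp [hc], by simpa using h1⟩
    refine ⟨List.prefix_iff_getElem?.mpr (fun j hj => ?_), ?_⟩
    · rw [List.getElem?_drop, List.getElem?_eq_getElem (by omega)]
      exact congrArg some ((key j hj).2)
    · rw [pvFreeB, List.all_eq_true]
      intro r hrm
      by_contra hbad
      simp only [Bool.or_eq_true, decide_eq_true_eq, not_or, not_le] at hbad
      obtain ⟨hb1, hb2⟩ := hbad
      have hrlt := hr r hrm
      -- pick i := max p r.1 ∈ [p, p+len) ∩ [r.1, r.2)
      rcases le_total p r.1 with hc | hc
      · have hj := (key (r.1 - p) (by omega)).1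
        rw [pvCovered, List.any_eq_false] at hj
        have := hj r hrm
        simp only [Bool.and_eq_true, decide_eq_true_eq, not_and, not_lt] at this
        omega
      · have hj := (key 0 (by omega)).1
        rw [pvCovered, List.any_eq_false] at hj
        have := hj r hrm
        simp only [Bool.and_eq_true, decide_eq_true_eq, not_and, not_lt] at this
        omega
  · rintro ⟨hq, hfree⟩
    have hle : city.length ≤ q.length - p := by simpa using hq.length_le
    have hplen : p + city.length ≤ q.length := by
      have := hq.length_le; simp at this; omega
    refine List.prefix_iff_getElem?.mpr (fun j hj => ?_)
    rw [List.getElem?_drop, pvMask_getElem? q claimed (p + j) (by omega)]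
    have hc : pvCovered claimed (p + j) = false := by
      rw [pvCovered, List.any_eq_false]
      intro r hrm
      rw [pvFreeB, List.all_eq_true] at hfree
      have := hfree r hrm
      simp only [Bool.or_eq_true, decide_eq_true_eq] at this
      simp only [Bool.and_eq_true, decide_eq_true_eq, not_and, not_lt]
      omega
    rw [hc]
    have h1 := List.prefix_iff_getElem?.mp hq j hj
    rw [List.getElem?_drop, List.getElem?_eq_getElem (by omega)] at h1
    simpa using h1

-- rebuilding the masked string after a hit = masking q by the extended claimed list
lemma pvMask_append (q : List Char) (claimed : List (Nat × Nat)) (p len : Nat)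
    (h : p + len ≤ q.length) :
    (pvMask q claimed).take p ++ List.replicate len '_' ++ (pvMask q claimed).drop (p + len)
      = pvMask q (claimed ++ [(p, p + len)]) := by
  apply List.ext_getElem
  · simp [pvMask_length]; omega
  · intro i h1 h2
    have hiq : i < q.length := by simpa [pvMask_length] using h2
    have hcov : pvCovered (claimed ++ [(p, p + len)]) i
        = (pvCovered claimed i || (decide (p ≤ i) && decide (i < p + len))) := by
      simp [pvCovered, List.any_append]
    rw [pvMask_getElem _ _ _ h2, hcov]
    rw [List.getElem_append]
    by_cases c1 : i < p
    · rw [dif_pos (by simp [pvMask_length]; omega), List.getElem_append,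
        dif_pos (by simp [pvMask_length]; omega),
        List.getElem_take, pvMask_getElem _ _ _ (by simp [pvMask_length]; omega)]
      have : (decide (p ≤ i) && decide (i < p + len)) = false := by simp; omega
      rw [this, Bool.or_false]
    · by_cases c2 : i < p + len
      · rw [dif_pos (by simp [pvMask_length]; omega), List.getElem_append,
          dif_neg (by simp [pvMask_length]; omega), List.getElem_replicate]
        have : (decide (p ≤ i) && decide (i < p + len)) = true := by simp; omega
        rw [this, Bool.or_true, if_pos rfl]
      · rw [dif_neg (by simp [pvMask_length]; omega)]
        have hidx : (List.take p (pvMask q claimed) ++ List.replicate len '_').length = p + len := by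
          simp [pvMask_length]; omega
        simp only [hidx]
        rw [List.getElem_drop]
        simp only [show p + len + (i - (p + len)) = i from by omega]
        rw [pvMask_getElem _ _ _ (by simp [pvMask_length]; omega)]
        have : (decide (p ≤ i) && decide (i < p + len)) = false := by simp; omega
        rw [this, Bool.or_false]

lemma pvFindRangeSome {n m : Nat} {pred : Nat → Bool} (hm : m < n) (hpm : pred m = true)
    (hmin : ∀ k, k < m → pred k = false) : (List.range n).find? pred = some m := by
  induction n with
  | zero => omega
  | succ n ih =>
    rw [List.range_succ, List.find?_append]
    by_cases h : m < n
    · rw [ih h]; rfl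
    · have hm' : m = n := by omega
      subst hm'
      have hnone : (List.range m).find? pred = none :=
        List.find?_eq_none.mpr (fun x hx => by simp [hmin x (List.mem_range.mp hx)])
      rw [hnone]
      simp [List.find?, hpm]

-- one loop iteration: A's step on the masked string = B's step on the claimed ranges
lemma pvStep_eq (q city : List Char) (claimed : List (Nat × Nat))
    (found : List (Int × List Char))
    (hno : '_' ∉ city) (hlen : 0 < city.length)
    (hr : ∀ r ∈ claimed, r.1 < r.2) :
    pvMaskStep (pvMask q claimed, found) city =
      ((pvMask q (pvClaimStep q (claimed, found) city).1),
        (pvClaimStep q (claimed, found) city).2) ∧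
    (∀ r ∈ (pvClaimStep q (claimed, found) city).1, r.1 < r.2) := by
  by_cases hpos : PySem.Chars.find (pvMask q claimed) city = -1
  · have hnone : pvFirstFree q city claimed = none := by
      unfold pvFirstFree
      apply List.find?_eq_none.mpr
      intro p _hp hpred
      simp only [Bool.and_eq_true, List.isPrefixOf_iff_prefix] at hpred
      have hmaskpre : city <+: (pvMask q claimed).drop p :=
        (pvPrefix_mask_iff q city claimed hno hlen hr p).mpr ⟨hpred.1, hpred.2⟩
      have hin : PySem.Chars.isIn city (pvMask q claimed) = true :=
        (PySem.Chars.exists_prefix_drop_iff_isIn city _).mp ⟨p, hmaskpre⟩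
      exact ((PySem.Chars.find_eq_neg_one_iff _ city).mp hpos)
        ((PySem.Chars.isIn_iff_infix city _).mp hin)
    refine ⟨?_, ?_⟩
    · simp [pvMaskStep, pvClaimStep, hpos, hnone]
    · simp only [pvClaimStep, hnone]
      exact hr
  · obtain ⟨pos, hposdef⟩ : ∃ pos, PySem.Chars.find (pvMask q claimed) city = pos := ⟨_, rfl⟩
    rw [hposdef] at hpos
    have hff : PySem.Chars.findFrom (pvMask q claimed) city ((0:Nat):Int) = pos := by
      norm_num [PySem.Chars.findFrom_zero, hposdef]
    have hspec := PySem.Chars.findFrom_natCast_spec (pvMask q claimed) city 0 (by simp)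
      (by rw [hff]; exact hpos)
    rw [hff] at hspec
    obtain ⟨hge, hpref, hmin⟩ := hspec
    obtain ⟨P, hP⟩ : ∃ P : Nat, pos = (P : Int) := ⟨pos.toNat, (Int.toNat_of_nonneg hge).symm⟩
    rw [hP] at hpref hmin hposdef
    simp only [Int.toNat_natCast] at hpref hmin
    obtain ⟨hq, hfree⟩ := (pvPrefix_mask_iff q city claimed hno hlen hr P).mp hpref
    have hle : city.length ≤ q.length - P := by
      have := hq.length_le; simpa using this
    have hplen : P + city.length ≤ q.length := by omega
    have hfirst : pvFirstFree q city claimed = some P := by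
      unfold pvFirstFree
      apply pvFindRangeSome
      · omega
      · simp only [Bool.and_eq_true, List.isPrefixOf_iff_prefix]
        exact ⟨hq, hfree⟩
      · intro k hk
        rw [Bool.eq_false_iff]
        intro hkt
        simp only [Bool.and_eq_true, List.isPrefixOf_iff_prefix] at hkt
        exact hmin k (by omega) hk
          ((pvPrefix_mask_iff q city claimed hno hlen hr k).mpr ⟨hkt.1, hkt.2⟩)
    have e2 : ((P : Int) + (city.length : Int)).toNat = P + city.length := by omega
    refine ⟨?_, ?_⟩
    · simp only [pvMaskStep, pvClaimStep, hfirst, hposdef]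
      rw [if_pos (by omega : ((P : Int)) ≠ -1)]
      refine Prod.ext ?_ ?_
      · simp only [PySem.Chars.slice_eq_listSlice]
        rw [PySem.List.slice_to _ (by omega), PySem.List.slice_from _ (by omega)]
        simp only [e2, Int.toNat_natCast]
        exact pvMask_append q claimed P city.length hplen
      · rfl
    · simp only [pvClaimStep, hfirst]
      intro r hrm
      rcases List.mem_append.mp hrm with h1 | h1
      · exact hr r h1
      · obtain rfl := List.mem_singleton.mp h1
        simpa using hlen

-- the whole loop
lemma pvFold_eq (cs : List (List Char)) (hcs : ∀ c ∈ cs, '_' ∉ c ∧ 0 < c.length)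
    (q : List Char) (claimed : List (Nat × Nat)) (found : List (Int × List Char))
    (hr : ∀ r ∈ claimed, r.1 < r.2) :
    cs.foldl pvMaskStep (pvMask q claimed, found) =
      ((pvMask q ((cs.foldl (pvClaimStep q) (claimed, found)).1)),
        (cs.foldl (pvClaimStep q) (claimed, found)).2) := by
  induction cs generalizing claimed found with
  | nil => simp
  | cons c cs ih =>
    obtain ⟨h1, h2⟩ := pvStep_eq q c claimed found (hcs c (by simp)).1 (hcs c (by simp)).2 hr
    simp only [List.foldl_cons, h1]
    exact ih (fun x hx => hcs x (by simp [hx])) _ _ h2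

lemma pvCitiesFacts : ∀ c ∈ pvSortedCities, '_' ∉ c ∧ 0 < c.length := by decide

-- ===== VERDICT (by name: the statement is the Claim_ definition above) =====
theorem extract_cities_py_spec : Claim_equal_extract_cities_py := by
  intro query _
  unfold Spec_extract_cities_py extract_cities_py extract_cities_py_alt
  have h := pvFold_eq pvSortedCities pvCitiesFacts
    (PySem.Chars.lower (PySem.Chars.strip query.toList)) [] [] (by simp)
  rw [pvMask_nil] at h
  simp only [h]
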